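-- pv_equiv track=rewrite | github.com/johnlohjy/Hidden-Markov-Models-School-Project | Part 2_Toy_Example.py | sentence_creator_states
-- ===== SOURCE A (Python) =====
-- def sentence_creator_states(original):
--     sentences = []
--     sentence = []
--     for i in original:
--         #If it is not an empty line
--         if i!='':
--             #Append the state to sentence
--             parts = i.split(" ")
--             state = parts[-1]
--             sentence.append(state)
--         #If it is an empty line
--         #The sentence is complete
--         else:
--             #Add the START and STOP state for computation later
--             sentence.insert(0, "START")
--             sentence.append("STOP")
--             sentences.append(sentence)
--             sentence = []
--
--     #In the case of the last sentence where it the training set does not end with an empty line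
--     if len(sentence)!=0:
--         sentences.append(sentence)
--
--     return sentences
-- ===== SOURCE B (Python) =====
-- def sentence_creator_states(original):
--     # Index-based two-phase approach: first record the positions of all blank
--     # lines, then cut the input into slices by index arithmetic — each
--     # (previous blank + 1, blank) span becomes a START/STOP-wrapped sentence,
--     # and whatever follows the last blank is appended bare if non-empty.
--     n = len(original)
--     blanks = [i for i, line in enumerate(original) if line == '']
--     starts = [0] + [b + 1 for b in blanks]
--     out = [['START'] + [l.split(' ')[-1] for l in original[s:e]] + ['STOP']
--            for s, e in zip(starts, blanks)]
--     tail = [l.split(' ')[-1] for l in original[starts[-1]:n]]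
--     if tail:
--         out.append(tail)
--     return out
-- ===== Notes on version B (the rewrite author's own statement) =====
-- stated objective: alternative
-- what changed: B is index-based: it first computes the list of positions of blank lines via enumerate, derives each sentence's start index by arithmetic (previous blank + 1), and materialises every sentence as a slice original[s:e] wrapped in START/STOP (the post-last-blank slice appended bare if non-empty), instead of A's streaming pass that accumulates states and flushes at each blank.
import Mathlib
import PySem

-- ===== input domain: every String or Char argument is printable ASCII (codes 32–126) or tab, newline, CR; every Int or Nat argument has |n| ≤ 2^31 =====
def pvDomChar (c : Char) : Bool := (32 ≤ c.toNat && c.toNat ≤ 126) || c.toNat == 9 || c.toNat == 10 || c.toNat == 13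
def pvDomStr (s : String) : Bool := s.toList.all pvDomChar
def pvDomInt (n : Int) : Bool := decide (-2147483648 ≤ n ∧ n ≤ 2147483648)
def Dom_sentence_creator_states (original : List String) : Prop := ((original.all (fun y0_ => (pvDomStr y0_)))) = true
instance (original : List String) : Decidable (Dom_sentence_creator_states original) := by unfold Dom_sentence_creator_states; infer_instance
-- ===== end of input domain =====

-- B cuts the input by index arithmetic: it first lists the positions of blank
-- lines, then wraps each inter-blank slice in START/STOP (alternative
-- algorithm, same cost as A's streaming accumulate-and-flush pass).


-- ===== PORT A =====
-- i.split(" ")[-1]; split with a nonempty separator never returns [], so the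
-- `.getD ""` default is unreachable (exact).
def pvStateOf (i : String) : String :=
  (PySem.List.pyGet? ((PySem.Str.split? i " ").getD []) (-1)).getD ""

-- A's loop: state = (sentences, sentence)
def pvAStep (st : List (List String) × List String) (i : String) :
    List (List String) × List String :=
  if i ≠ "" then (st.1, st.2 ++ [pvStateOf i])
  else (st.1 ++ [["START"] ++ st.2 ++ ["STOP"]], [])

def sentence_creator_states (original : List String) : List (List String) :=
  let st := original.foldl pvAStep ([], [])
  if st.2.length ≠ 0 then st.1 ++ [st.2] else st.1

-- ===== PORT B =====
-- starts[-1]: starts is a nonempty literal, so the `.getD 0` default is unreachable (exact).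
def sentence_creator_states_alt (original : List String) : List (List String) :=
  let n : Int := original.length
  let blanks : List Int :=
    ((PySem.List.enumerate original 0).filter (fun p => p.2 == "")).map (fun p => p.1)
  let starts : List Int := 0 :: blanks.map (· + 1)
  let out := (starts.zip blanks).map (fun p =>
    ["START"] ++ (PySem.List.slice original (some p.1) (some p.2)).map pvStateOf ++ ["STOP"])
  let tail := (PySem.List.slice original
      (some ((PySem.List.pyGet? starts (-1)).getD 0)) (some n)).map pvStateOf
  if tail ≠ [] then out ++ [tail] else out

-- ===== PRECONDITION & SPEC =====
def Spec_sentence_creator_states (original : List String) (out : List (List String)) : Prop := out = sentence_creator_states_alt original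
instance (original : List String) (out : List (List String)) : Decidable (Spec_sentence_creator_states original out) := by unfold Spec_sentence_creator_states; infer_instance

-- ===== CLAIM (what is proved, stated in full; the proofs are below) =====
def Claim_equal_sentence_creator_states : Prop := ∀ (original : List String), Dom_sentence_creator_states original → Spec_sentence_creator_states original (sentence_creator_states original)

-- ===== LEMMAS AND PROOFS =====

-- A's fold, written as front recursion with the open sentence as parameter
def pvG (cur : List String) : List String → List (List String) × List String
  | [] => ([], cur)
  | x :: xs =>
      if x = "" then
        ((["START"] ++ cur ++ ["STOP"]) :: (pvG [] xs).1, (pvG [] xs).2)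
      else pvG (cur ++ [pvStateOf x]) xs

-- blank-line positions, as Nats
def pvBl : List String → List Nat
  | [] => []
  | x :: xs => if x = "" then 0 :: (pvBl xs).map (· + 1) else (pvBl xs).map (· + 1)

-- start of the final (unterminated) sentence = last blank position + 1, or 0
def pvLS (l : List String) : Nat := ((pvBl l).map (· + 1)).getLastD 0

-- (start, end) pairs of terminated sentences
def pvPairs (l : List String) : List (Nat × Nat) :=
  (0 :: (pvBl l).map (· + 1)).zip (pvBl l)

theorem pv_fold (l : List String) :
    ∀ (acc : List (List String)) (cur : List String),
      l.foldl pvAStep (acc, cur) = (acc ++ (pvG cur l).1, (pvG cur l).2) := by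
  induction l with
  | nil => intro acc cur; simp [pvG]
  | cons x xs ih =>
      intro acc cur
      by_cases hx : x = ""
      · simp [pvAStep, pvG, hx, ih]
      · simp [pvAStep, pvG, hx, ih]

theorem pv_cons_getLast? (M : List Nat) (h : M ≠ []) :
    (0 :: M).getLast? = M.getLast? := by
  cases M with
  | nil => simp at h
  | cons a t => simp [List.getLast?_cons_cons]

theorem pv_LS_eq (l : List String) :
    pvLS l = ((pvBl l).getLast?.map (· + 1)).getD 0 := by
  simp [pvLS, List.getLast?_map]

theorem pv_zip_shift (u v : List Nat) :
    (u.map (· + 1)).zip (v.map (· + 1)) = (u.zip v).map (fun p => (p.1 + 1, p.2 + 1)) := by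
  simp [List.zip_map]

theorem pv_zip_shift' (u v : List Nat) :
    (0 :: u.map (· + 1)).zip (0 :: v.map (· + 1)) =
      (0, 0) :: (u.zip v).map (fun p => (p.1 + 1, p.2 + 1)) := by
  rw [List.zip_cons_cons, pv_zip_shift]

theorem pv_zip_shift2 (c : Nat) (w : List Nat) :
    (0 :: ((c :: w).map (· + 1)).map (· + 1)).zip ((c :: w).map (· + 1)) =
      (0, c + 1) :: (((c + 1) :: w.map (· + 1)).zip w).map (fun p => (p.1 + 1, p.2 + 1)) := by
  rw [← pv_zip_shift]
  simp [List.zip_cons_cons]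

theorem pv_LS_blank (x : String) (xs : List String) (h : x = "") :
    pvLS (x :: xs) = pvLS xs + 1 := by
  have hb : pvBl (x :: xs) = 0 :: (pvBl xs).map (· + 1) := by simp [pvBl, h]
  rw [pv_LS_eq, pv_LS_eq, hb]
  cases hbl : pvBl xs with
  | nil => simp
  | cons b bs =>
      rw [pv_cons_getLast? _ (by simp), List.getLast?_map]
      cases hg : (b :: bs).getLast? with
      | none => simp at hg
      | some y => simp

theorem pv_LS_nonblank_cons (x : String) (xs : List String) (h : ¬ x = "")
    (b : Nat) (bs : List Nat) (hb : pvBl xs = b :: bs) :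
    pvLS (x :: xs) = pvLS xs + 1 := by
  have hb' : pvBl (x :: xs) = (pvBl xs).map (· + 1) := by simp [pvBl, h]
  rw [pv_LS_eq, pv_LS_eq, hb', hb, List.getLast?_map]
  cases hg : (b :: bs).getLast? with
  | none => simp at hg
  | some y => simp

theorem pv_main (l : List String) :
    ∀ cur : List String,
      pvG cur l =
        ((pvPairs l).map (fun p =>
            ["START"] ++ (if p.1 = 0 then cur else []) ++
              ((l.drop p.1).take (p.2 - p.1)).map pvStateOf ++ ["STOP"]),
         (if pvLS l = 0 then cur else []) ++ (l.drop (pvLS l)).map pvStateOf) := by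
  induction l with
  | nil => intro cur; simp [pvG, pvPairs, pvBl, pvLS]
  | cons x xs ih =>
      intro cur
      by_cases hx : x = ""
      · -- blank: a new (0,0) pair, everything else shifts by one
        have hblx : pvBl (x :: xs) = 0 :: (pvBl xs).map (· + 1) := by simp [pvBl, hx]
        have hpair : pvPairs (x :: xs) =
            (0, 0) :: (pvPairs xs).map (fun p => (p.1 + 1, p.2 + 1)) := by
          show (0 :: (pvBl (x :: xs)).map (· + 1)).zip (pvBl (x :: xs)) = _
          rw [hblx, pv_zip_shift' (0 :: (pvBl xs).map (· + 1)) (pvBl xs)]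
          rfl
        have hls := pv_LS_blank x xs hx
        rw [show pvG cur (x :: xs) =
              ((["START"] ++ cur ++ ["STOP"]) :: (pvG [] xs).1, (pvG [] xs).2) by
            simp [pvG, hx]]
        rw [ih []]
        refine Prod.ext ?_ ?_
        · simp only [hpair, List.map_cons, List.map_map]
          refine List.cons_eq_cons.mpr ⟨by simp, ?_⟩
          apply List.map_congr_left
          intro p _
          simp [Nat.succ_sub_succ]
        · simp [hls]
      · -- non-blank: the head state joins the first segment
        have hblx : pvBl (x :: xs) = (pvBl xs).map (· + 1) := by simp [pvBl, hx]
        rw [show pvG cur (x :: xs) = pvG (cur ++ [pvStateOf x]) xs by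
              simp [pvG, hx]]
        rw [ih (cur ++ [pvStateOf x])]
        cases hb : pvBl xs with
        | nil =>
            have hls : pvLS (x :: xs) = 0 := by rw [pv_LS_eq, hblx, hb]; simp
            have hls' : pvLS xs = 0 := by rw [pv_LS_eq, hb]; simp
            have hpair : pvPairs (x :: xs) = [] := by
              show (0 :: (pvBl (x :: xs)).map (· + 1)).zip (pvBl (x :: xs)) = _
              rw [hblx, hb]; simp
            have hpair' : pvPairs xs = [] := by
              show (0 :: (pvBl xs).map (· + 1)).zip (pvBl xs) = _
              rw [hb]; simp
            simp [hpair, hpair', hls, hls']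
        | cons b bs =>
            have hls := pv_LS_nonblank_cons x xs hx b bs hb
            have hls1 : pvLS xs ≠ 0 := by
              rw [pv_LS_eq, hb]
              cases hg : (b :: bs).getLast? with
              | none => simp at hg
              | some y => simp
            have hpair : pvPairs (x :: xs) =
                (0, b + 1) ::
                  (((b + 1) :: bs.map (· + 1)).zip bs).map (fun p => (p.1 + 1, p.2 + 1)) := by
              show (0 :: (pvBl (x :: xs)).map (· + 1)).zip (pvBl (x :: xs)) = _
              rw [hblx, hb, pv_zip_shift2 b bs]
            have hpair' : pvPairs xs = (0, b) :: ((b + 1) :: bs.map (· + 1)).zip bs := by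
              show (0 :: (pvBl xs).map (· + 1)).zip (pvBl xs) = _
              rw [hb]; simp [List.zip_cons_cons]
            refine Prod.ext ?_ ?_
            · simp only [hpair, hpair', List.map_cons, List.map_map]
              refine List.cons_eq_cons.mpr ⟨by simp, ?_⟩
              apply List.map_congr_left
              intro p hp
              have h1 : p.1 ≠ 0 := by
                have hmem := (List.of_mem_zip hp).1
                rcases List.mem_cons.mp hmem with h | h
                · omega
                · obtain ⟨k, _, hk⟩ := List.mem_map.mp h; omega
              simp [h1, Nat.succ_sub_succ]
            · simp [hls, hls1]

-- the enumerate/filter/map pipeline in B computes pvBl (cast to Int)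
theorem pv_enum_bl (l : List String) :
    ∀ s : Int,
      ((PySem.List.enumerate l s).filter (fun p => p.2 == "")).map (fun p => p.1) =
        (pvBl l).map (fun k : Nat => s + (k : Int)) := by
  induction l with
  | nil => intro s; simp [PySem.List.enumerate_nil, pvBl]
  | cons x xs ih =>
      intro s
      rw [PySem.List.enumerate_cons]
      by_cases hx : x = ""
      · rw [List.filter_cons_of_pos (by simp [hx]), List.map_cons, ih (s + 1)]
        rw [show pvBl (x :: xs) = 0 :: (pvBl xs).map (· + 1) from by simp [pvBl, hx]]
        simp only [List.map_cons, List.map_map, Function.comp_def]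
        refine List.cons_eq_cons.mpr ⟨by simp, ?_⟩
        apply List.map_congr_left
        intro k _
        push_cast
        ring
      · rw [List.filter_cons_of_neg (by simp [hx]), ih (s + 1)]
        rw [show pvBl (x :: xs) = (pvBl xs).map (· + 1) from by simp [pvBl, hx]]
        simp only [List.map_map, Function.comp_def]
        apply List.map_congr_left
        intro k _
        push_cast
        ring

-- cast bridge: the Int-level pairs B zips are the Nat-level pvPairs, cast
theorem pv_cast_starts (L : List Nat) :
    ((0 : Int) :: (L.map (fun k : Nat => (k : Int))).map (· + 1)) =
      (0 :: L.map (· + 1)).map (fun k : Nat => (k : Int)) := by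
  simp only [List.map_cons, List.map_map, Function.comp_def, Nat.cast_zero]
  refine List.cons_eq_cons.mpr ⟨rfl, ?_⟩
  apply List.map_congr_left
  intro k _
  push_cast
  ring

theorem pv_cast_zip (L : List Nat) :
    (((0 : Int) :: (L.map (fun k : Nat => (k : Int))).map (· + 1)).zip
        (L.map (fun k : Nat => (k : Int)))) =
      ((0 :: L.map (· + 1)).zip L).map
        (Prod.map (fun k : Nat => (k : Int)) (fun k : Nat => (k : Int))) := by
  rw [pv_cast_starts, List.zip_map]

theorem pv_last_start (L : List Nat) :
    PySem.List.pyGet? ((0 : Int) :: (L.map (fun k : Nat => (k : Int))).map (· + 1)) (-1) =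
      some ((((L.map (fun k : Nat => k + 1)).getLastD 0 : Nat) : Int)) := by
  rw [PySem.List.pyGet?_neg_one, pv_cast_starts, List.getLast?_map, List.getLast?_cons]
  simp

-- ===== VERDICT (by name: the statement is the Claim_ definition above) =====
theorem sentence_creator_states_spec : Claim_equal_sentence_creator_states := by
  intro original _
  unfold Spec_sentence_creator_states sentence_creator_states sentence_creator_states_alt
  rw [pv_fold original [] [], pv_main original []]
  simp only [List.nil_append, ite_self, List.append_nil]
  rw [pv_enum_bl original 0]
  simp only [zero_add]
  rw [pv_cast_zip (pvBl original), pv_last_start (pvBl original)]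
  rw [show ((pvBl original).map (fun k : Nat => k + 1)).getLastD 0 = pvLS original from rfl]
  rw [List.map_map]
  have hseg : ∀ p ∈ pvPairs original,
      ((fun p => ["START"] ++
            (PySem.List.slice original (some p.1) (some p.2)).map pvStateOf ++ ["STOP"]) ∘
          (Prod.map (fun k : Nat => (k : Int)) (fun k : Nat => (k : Int)))) p =
        (fun p : Nat × Nat => ["START"] ++
            ((original.drop p.1).take (p.2 - p.1)).map pvStateOf ++ ["STOP"]) p := by
    intro p _
    simp [Prod.map, PySem.List.slice_natCast]
  rw [show ((0 :: (pvBl original).map (fun x : Nat => x + 1)).zip (pvBl original)) = pvPairs original from rfl]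
  rw [List.map_congr_left hseg]
  have htail : PySem.List.slice original (some ((some ((pvLS original : Int))).getD 0))
      (some ((original.length : Nat) : Int)) = original.drop (pvLS original) := by
    rw [Option.getD_some, PySem.List.slice_natCast]
    exact List.take_of_length_le (by simp)
  rw [htail]
  by_cases hc : (original.drop (pvLS original)).map pvStateOf = []
  · simp [hc]
  · have hlt : pvLS original < original.length := by
      rcases lt_or_ge (pvLS original) original.length with h | h
      · exact h
      · exact absurd (by simp [List.drop_eq_nil_of_le h]) hc
    have h0 : original.length - pvLS original ≠ 0 := by omega
    simp [hlt, h0]
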